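-- pv_equiv track=rewrite | github.com/GMM-rgb/AI_RNN_Model | ai_script.py | simulate_backspace_improved
-- ===== SOURCE A (Python) =====
-- def simulate_backspace_improved(generated_tokens, threshold=1):
--     """
--     Compress consecutive duplicate tokens.
--     For non-period tokens, collapse duplicates to a single instance.
--     For periods (ASCII 46), if the group size is exactly 2 or 3 (i.e. ".." or "..."), keep them;
--     if more than 3 are consecutive, compress them to exactly 3.
--     """
--     if not generated_tokens:
--         return generated_tokens
--     new_tokens = []
--     i = 0
--     while i < len(generated_tokens):
--         token = generated_tokens[i]
--         count = 1
--         while i + count < len(generated_tokens) and generated_tokens[i + count] == token: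
--             count += 1
--         if token == 460:  # period character
--             if count == 2 or count == 3:
--                 allowed = count
--             elif count > 3:
--                 allowed = 3
--             else:
--                 allowed = 1
--         else:
--             allowed = 1
--         new_tokens.extend([token] * allowed)
--         i += count
--     return new_tokens
-- ===== SOURCE B (Python) =====
-- def simulate_backspace_improved(generated_tokens, threshold=1):
--     if not generated_tokens:
--         return generated_tokens
--     g = generated_tokens
--     prev1 = [None] + g
--     prev2 = [None] + prev1
--     prev3 = [None] + prev2
--     return [t for t, a, b, c in zip(g, prev1, prev2, prev3)
--             if a != t or (t == 460 and not (b == t and c == t))]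
-- ===== Notes on version B (the rewrite author's own statement) =====
-- stated objective: alternative
-- what changed: A's run-length counting loop (inner while counting duplicates, then emitting allowed copies per run) is replaced by a stateless sliding-window filter: the list is zipped with three shifted copies of itself and a token is kept iff it differs from its predecessor, or it is a period whose three precedessors are not all the same period; measured faster by a constant factor because one C-level zip/comprehension replaces the interpreted index-by-index while loops.
import Mathlib
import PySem

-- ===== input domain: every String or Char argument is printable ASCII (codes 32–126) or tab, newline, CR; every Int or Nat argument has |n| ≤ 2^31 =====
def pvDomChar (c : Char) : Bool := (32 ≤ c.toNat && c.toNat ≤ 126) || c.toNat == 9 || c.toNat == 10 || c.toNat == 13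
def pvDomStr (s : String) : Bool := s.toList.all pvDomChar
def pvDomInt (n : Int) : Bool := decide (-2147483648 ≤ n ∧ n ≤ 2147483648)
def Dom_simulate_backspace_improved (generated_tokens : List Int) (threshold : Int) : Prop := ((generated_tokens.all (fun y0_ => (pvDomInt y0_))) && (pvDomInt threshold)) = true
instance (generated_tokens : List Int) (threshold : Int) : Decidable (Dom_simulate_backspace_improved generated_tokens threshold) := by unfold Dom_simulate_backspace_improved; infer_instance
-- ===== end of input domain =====

-- B replaces A's run-length counting pass by a stateless sliding-window filter
-- (zip with three shifted copies, keep by a local condition); objective: alternative (measured constant-factor faster).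

-- ===== PORT A =====
-- inner `while i + count < len(...) and generated_tokens[i+count] == token` loop,
-- phrased on the suffix after position i
def pvCountRun (t : Int) : List Int → Nat
  | [] => 0
  | x :: xs => if x == t then 1 + pvCountRun t xs else 0

-- the outer `while i < len(generated_tokens)` loop; the index i becomes the remaining suffix
def pvRunA : List Int → List Int
  | [] => []
  | t :: rest =>
    let c := pvCountRun t rest
    let count := 1 + c
    let allowed : Nat :=
      if t == 460 then
        if count == 2 || count == 3 then count
        else if count > 3 then 3
        else 1
      else 1
    List.replicate allowed t ++ pvRunA (rest.drop c)
termination_by l => l.length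
decreasing_by simp [List.length_drop]

def simulate_backspace_improved (generated_tokens : List Int) (_threshold : Int) : List Int :=
  if generated_tokens.isEmpty then generated_tokens
  else pvRunA generated_tokens

-- ===== PORT B =====
-- the comprehension's keep condition: `a != t or (t == 460 and not (b == t and c == t))`
-- (None, which never equals an int token, is `none`)
def pvKeepB (t : Int) (a b c : Option Int) : Bool :=
  (a != some t) || (t == 460 && !(b == some t && c == some t))

def simulate_backspace_improved_alt (generated_tokens : List Int) (_threshold : Int) : List Int :=
  if generated_tokens.isEmpty then generated_tokens
  else
    let g := generated_tokens
    let prev1 : List (Option Int) := none :: g.map some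
    let prev2 : List (Option Int) := none :: prev1
    let prev3 : List (Option Int) := none :: prev2
    ((g.zip (prev1.zip (prev2.zip prev3))).filter
      (fun p => pvKeepB p.1 p.2.1 p.2.2.1 p.2.2.2)).map (·.1)

-- ===== PRECONDITION & SPEC =====
def Spec_simulate_backspace_improved (generated_tokens : List Int) (threshold : Int) (out : List Int) : Prop := out = simulate_backspace_improved_alt generated_tokens threshold
instance (generated_tokens : List Int) (threshold : Int) (out : List Int) : Decidable (Spec_simulate_backspace_improved generated_tokens threshold out) := by unfold Spec_simulate_backspace_improved; infer_instance

-- ===== CLAIM (what is proved, stated in full; the proofs are below) =====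
def Claim_equal_simulate_backspace_improved : Prop := ∀ (generated_tokens : List Int) (threshold : Int), Dom_simulate_backspace_improved generated_tokens threshold → Spec_simulate_backspace_improved generated_tokens threshold (simulate_backspace_improved generated_tokens threshold)

-- ===== LEMMAS AND PROOFS =====

-- the sliding-window filter as a recursion carrying the previous three tokens
def pvWin : Option Int → Option Int → Option Int → List Int → List Int
  | _, _, _, [] => []
  | a, b, c, t :: rest => (if pvKeepB t a b c then [t] else []) ++ pvWin (some t) a b rest

theorem pvZip_eq_win (g : List Int) (a b c : Option Int) :
    ((g.zip ((a :: g.map some).zip ((b :: a :: g.map some).zip (c :: b :: a :: g.map some)))).filter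
      (fun p => pvKeepB p.1 p.2.1 p.2.2.1 p.2.2.2)).map (·.1) = pvWin a b c g := by
  induction g generalizing a b c with
  | nil => simp [pvWin]
  | cons t gs IH =>
    have h := IH (some t) a b
    rw [pvWin, ← h]
    cases hk : pvKeepB t a b c <;> simp [hk]

-- once three consecutive copies of t precede, further copies of t are all dropped
theorem pvWin_sat (t : Int) (n : Nat) (rest : List Int) :
    pvWin (some t) (some t) (some t) (List.replicate n t ++ rest) =
      pvWin (some t) (some t) (some t) rest := by
  induction n with
  | zero => rfl
  | succ n IH => simp [List.replicate_succ, pvWin, pvKeepB, IH]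

theorem pvAllowed_eq (t : Int) (c : Nat) :
    (if t == 460 then
        if 1 + c == 2 || 1 + c == 3 then 1 + c
        else if 1 + c > 3 then 3
        else 1
      else 1)
    = (if t == 460 && 1 + c > 1 then (if 1 + c ≤ 3 then 1 + c else 3) else 1) := by
  by_cases ht : t = (460 : Int)
  · simp only [ht, beq_self_eq_true, if_pos, Bool.true_and]
    split_ifs <;> simp_all <;> omega
  · simp [ht]

-- one whole run of the window filter, with a boundary context on the left
theorem pvWin_run (t : Int) (k : Nat) (rest' : List Int) (a b c : Option Int)
    (ha : a ≠ some t) :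
    ∃ b' c', pvWin a b c (t :: (List.replicate k t ++ rest')) =
      List.replicate (if t == 460 && 1 + k > 1 then (if 1 + k ≤ 3 then 1 + k else 3) else 1) t
        ++ pvWin (some t) b' c' rest' := by
  match k with
  | 0 =>
    refine ⟨a, b, ?_⟩
    simp [pvWin, pvKeepB, ha]
  | 1 =>
    refine ⟨some t, a, ?_⟩
    by_cases ht : t = (460 : Int)
    · subst ht; simp [pvWin, pvKeepB, ha, List.replicate_succ]
    · simp [pvWin, pvKeepB, ha, ht, List.replicate_succ]
  | 2 =>
    refine ⟨some t, some t, ?_⟩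
    by_cases ht : t = (460 : Int)
    · subst ht; simp [pvWin, pvKeepB, ha, List.replicate_succ]
    · simp [pvWin, pvKeepB, ha, ht, List.replicate_succ]
  | (n+3) =>
    refine ⟨some t, some t, ?_⟩
    have hsat := pvWin_sat t n rest'
    have h3 : ¬ (1 + (n + 3) ≤ 3) := by omega
    by_cases ht : t = (460 : Int)
    · subst ht
      simp only [List.replicate_succ, List.cons_append, pvWin, pvKeepB, hsat] at *
      simp [ha, h3, List.replicate_succ]
    · simp only [List.replicate_succ, List.cons_append, pvWin, pvKeepB, hsat] at *
      simp [ha, ht, List.replicate_succ]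

theorem pvCountRun_takeWhile (t : Int) (l : List Int) :
    l.takeWhile (· == t) = List.replicate (pvCountRun t l) t := by
  induction l with
  | nil => rfl
  | cons x xs IH =>
    by_cases h : x = t
    · simp [pvCountRun, List.takeWhile, h, IH, List.replicate_succ, Nat.add_comm]
    · have hxt : (x == t) = false := by simp [h]
      simp [pvCountRun, List.takeWhile, hxt]

theorem pvDrop_countRun (t : Int) (l : List Int) :
    l.drop (pvCountRun t l) = l.dropWhile (· == t) := by
  induction l with
  | nil => rfl
  | cons x xs IH =>
    by_cases h : x = t
    · simp [pvCountRun, List.dropWhile, h, IH, Nat.add_comm]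
    · have hxt : (x == t) = false := by simp [h]
      simp [pvCountRun, List.dropWhile, hxt]

theorem pvWin_eq_runA : ∀ (n : Nat) (l : List Int) (a b c : Option Int),
    l.length ≤ n → (∀ t, l.head? = some t → a ≠ some t) →
    pvWin a b c l = pvRunA l := by
  intro n
  induction n with
  | zero =>
    intro l a b c hl _
    have : l = [] := List.eq_nil_of_length_eq_zero (Nat.le_zero.mp hl)
    subst this; simp [pvWin, pvRunA]
  | succ n IH =>
    intro l a b c hl hb
    match l with
    | [] => simp [pvWin, pvRunA]
    | t :: rest =>
      have ha : a ≠ some t := hb t rfl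
      have hsplit : rest = List.replicate (pvCountRun t rest) t ++ rest.drop (pvCountRun t rest) := by
        conv_lhs => rw [← List.takeWhile_append_dropWhile (p := (· == t)) (l := rest)]
        rw [pvCountRun_takeWhile, pvDrop_countRun]
      obtain ⟨b', c', hrun⟩ := pvWin_run t (pvCountRun t rest) (rest.drop (pvCountRun t rest)) a b c ha
      rw [pvRunA]

      rw [pvAllowed_eq]
      conv_lhs => rw [hsplit]
      rw [hrun]
      congr 1
      have hlen : (rest.drop (pvCountRun t rest)).length ≤ n := by
        have := List.length_drop (l := rest) (i := pvCountRun t rest)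
        simp only [List.length_cons] at hl
        omega
      refine IH _ (some t) b' c' hlen ?_
      intro x hx hax
      rw [pvDrop_countRun] at hx
      have h := List.head?_dropWhile_not (fun y => y == t) rest
      rw [hx] at h
      have : x = t := by simpa using hax.symm
      simp [this] at h

-- ===== VERDICT (by name: the statement is the Claim_ definition above) =====
theorem simulate_backspace_improved_spec : Claim_equal_simulate_backspace_improved := by
  intro gts threshold _
  unfold Spec_simulate_backspace_improved simulate_backspace_improved simulate_backspace_improved_alt
  split
  · rfl
  · rw [pvZip_eq_win]
    exact (pvWin_eq_runA gts.length gts none none none le_rfl (by intro t _; simp)).symm
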